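-- pv_equiv track=rewrite | github.com/hhvvjj/transition-validator-in-pseudocycles | transition_validator_in_pseudocycles.py | format_highlighted_sequence
-- ===== SOURCE A (Python) =====
-- from typing import List, Tuple, Optional
--
-- def format_highlighted_sequence(sequence: Tuple[int, ...], highlight_positions: Tuple[int, ...]) -> str:
--     """
--     Generate formatted string representation of a sequence with visual emphasis on key positions.
--
--     This function creates a human-readable representation of numerical sequences with
--     selective highlighting of mathematically significant positions using ANSI color codes.
--     The highlighting serves to draw attention to critical values such as repeated mr elements,
--     pseudocycle boundaries, or transformation endpoints in the analysis output.
--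
--     Visual formatting:
--         - Standard elements: Plain text representation
--         - Highlighted elements: Green background with ANSI escape sequences
--         - Format: "[elem1, elem2, HIGHLIGHTED_ELEM3, elem4, ...]"
--
--     Mathematical application:
--         Used extensively throughout the analysis pipeline to emphasize:
--         - Repeated mr values in m-sequences
--         - Pseudocycle boundary positions
--         - Corresponding Collatz domain endpoints
--         - Critical p-parameter positions for verification
--
--     Args:
--         sequence: Immutable sequence of integers to be formatted
--         highlight_positions: Tuple of indices indicating which elements to emphasize
--
--     Returns:
--         str: Formatted string with bracketed sequence notation and color highlighting
--
--     Example: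
--         >>> format_highlighted_sequence((10, 20, 30, 40, 50), (1, 3))
--         "[10, \033[42m20\033[0m, 30, \033[42m40\033[0m, 50]"
--
--     Time Complexity: O(n + h) where n = len(sequence), h = len(highlight_positions)
--     Space Complexity: O(n) for the result string
--
--     Note:
--         The function applies highlighting non-destructively, preserving original
--         sequence data while enhancing visual presentation for analysis interpretation.
--         ANSI codes ensure compatibility with terminal environments supporting color output.
--     """
--     GREEN_BG = '\033[42m'
--     RESET = '\033[0m'
--
--     result = []
--     for i, value in enumerate(sequence):
--         if i in highlight_positions:
--             result.append(f"{GREEN_BG}{value}{RESET}")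
--         else:
--             result.append(str(value))
--
--     return "[" + ", ".join(result) + "]"
-- ===== SOURCE B (Python) =====
-- def format_highlighted_sequence(sequence, highlight_positions):
--     GREEN_BG = '\033[42m'
--     RESET = '\033[0m'
--     result = [str(v) for v in sequence]
--     n = len(sequence)
--     for pos in highlight_positions:
--         if 0 <= pos < n:
--             result[pos] = f"{GREEN_BG}{sequence[pos]}{RESET}"
--     return "[" + ", ".join(result) + "]"
-- ===== Notes on version B (the rewrite author's own statement) =====
-- stated objective: faster
-- what changed: Replaces the per-element membership test 'i in highlight_positions' inside the main loop by a plain str() pass over the sequence followed by a scatter loop over highlight_positions that overwrites the in-range positions, removing the inner linear scan.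
import Mathlib
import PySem

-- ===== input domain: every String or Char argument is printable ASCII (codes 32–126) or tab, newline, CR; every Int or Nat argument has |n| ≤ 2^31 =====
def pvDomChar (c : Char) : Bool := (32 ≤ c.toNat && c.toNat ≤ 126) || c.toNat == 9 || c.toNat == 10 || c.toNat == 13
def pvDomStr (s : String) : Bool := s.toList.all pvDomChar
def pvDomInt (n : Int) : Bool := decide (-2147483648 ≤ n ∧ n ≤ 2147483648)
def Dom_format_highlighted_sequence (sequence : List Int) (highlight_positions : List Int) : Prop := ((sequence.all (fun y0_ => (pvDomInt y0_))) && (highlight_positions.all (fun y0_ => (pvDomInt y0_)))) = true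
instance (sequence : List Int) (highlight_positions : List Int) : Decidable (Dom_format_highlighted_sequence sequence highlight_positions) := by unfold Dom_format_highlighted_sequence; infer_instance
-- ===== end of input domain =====

-- ===== PORT A =====
-- B changes A's gather-with-membership-test into str() map + scatter over positions; measured asymptotically faster (O(n+h) vs O(n*h)).
def format_highlighted_sequence (sequence : List Int) (highlight_positions : List Int) : String :=
  let GREEN_BG : String := "\x1b[42m"
  let RESET : String := "\x1b[0m"
  let result : List String := (PySem.List.enumerate sequence).foldl
    (fun acc iv =>
      if iv.1 ∈ highlight_positions then acc ++ [GREEN_BG ++ PySem.Int.toStr iv.2 ++ RESET]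
      else acc ++ [PySem.Int.toStr iv.2]) []
  "[" ++ PySem.Str.join ", " result ++ "]"

-- ===== PORT B =====
def format_highlighted_sequence_alt (sequence : List Int) (highlight_positions : List Int) : String :=
  let GREEN_BG : String := "\x1b[42m"
  let RESET : String := "\x1b[0m"
  let base : List String := sequence.map (fun v => PySem.Int.toStr v)
  let n : Int := sequence.length
  let result : List String := highlight_positions.foldl
    (fun acc pos =>
      if 0 ≤ pos ∧ pos < n then
        PySem.List.pySetD acc pos (GREEN_BG ++ PySem.Int.toStr (PySem.List.pyGetD sequence pos 0) ++ RESET)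
      else acc) base
  "[" ++ PySem.Str.join ", " result ++ "]"

-- ===== PRECONDITION & SPEC =====
def Spec_format_highlighted_sequence (sequence : List Int) (highlight_positions : List Int) (out : String) : Prop := out = format_highlighted_sequence_alt sequence highlight_positions
instance (sequence : List Int) (highlight_positions : List Int) (out : String) : Decidable (Spec_format_highlighted_sequence sequence highlight_positions out) := by unfold Spec_format_highlighted_sequence; infer_instance

-- ===== CLAIM (what is proved, stated in full; the proofs are below) =====
def Claim_equal_format_highlighted_sequence : Prop := ∀ (sequence : List Int) (highlight_positions : List Int), Dom_format_highlighted_sequence sequence highlight_positions → Spec_format_highlighted_sequence sequence highlight_positions (format_highlighted_sequence sequence highlight_positions)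


-- ===== LEMMAS AND PROOFS =====
def pvHi (v : Int) : String := "\x1b[42m" ++ PySem.Int.toStr v ++ "\x1b[0m"

lemma pv_enum_getElem (xs : List Int) : ∀ (s : Int) (i : Nat) (h : i < xs.length),
    (PySem.List.enumerate xs s)[i]'(by simpa [PySem.List.length_enumerate] using h) = (s + i, xs[i]) := by
  induction xs with
  | nil => intro s i h; simp at h
  | cons x t ih =>
    intro s i h
    cases i with
    | zero => simp [PySem.List.enumerate_cons]
    | succ j =>
      have hj : j < t.length := by simpa using h
      have := ih (s + 1) j hj
      simp [PySem.List.enumerate_cons, this]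
      ring

def pvScat (sequence : List Int) (acc : List String) (hp : List Int) : List String :=
  hp.foldl (fun acc pos =>
      if 0 ≤ pos ∧ pos < (sequence.length : Int) then
        PySem.List.pySetD acc pos (pvHi (PySem.List.pyGetD sequence pos 0))
      else acc) acc

lemma pv_scatter_len (sequence : List Int) : ∀ (hp : List Int) (acc : List String),
    (pvScat sequence acc hp).length = acc.length := by
  intro hp
  induction hp with
  | nil => intro acc; rfl
  | cons p rest ih =>
    intro acc
    by_cases hg : 0 ≤ p ∧ p < (sequence.length : Int)
    · simp [pvScat, List.foldl_cons, hg] at ih ⊢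
      rw [ih]; simp [PySem.List.length_pySetD]
    · simpa [pvScat, List.foldl_cons, hg] using ih acc

lemma pv_scatter_get (sequence : List Int) : ∀ (hp : List Int) (acc : List String)
    (hlen : acc.length = sequence.length) (i : Nat) (h : i < sequence.length),
    (pvScat sequence acc hp)[i]'(by rw [pv_scatter_len, hlen]; exact h)
      = if ((i : Int) ∈ hp) then pvHi sequence[i] else acc[i]'(by omega) := by
  intro hp
  induction hp with
  | nil => intro acc hlen i h; simp [pvScat]
  | cons p rest ih =>
    intro acc hlen i h
    by_cases hg : 0 ≤ p ∧ p < (sequence.length : Int)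
    · have hset : PySem.List.pySetD acc p (pvHi (PySem.List.pyGetD sequence p 0))
          = acc.set p.toNat (pvHi (PySem.List.pyGetD sequence p 0)) :=
        PySem.List.pySetD_of_nonneg _ _ hg.1
      have hlen' : (acc.set p.toNat (pvHi (PySem.List.pyGetD sequence p 0))).length = sequence.length := by
        simpa using hlen
      have hstep : pvScat sequence acc (p :: rest)
          = pvScat sequence (acc.set p.toNat (pvHi (PySem.List.pyGetD sequence p 0))) rest := by
        simp [pvScat, List.foldl_cons, hg, hset]
      rw [List.getElem_of_eq hstep, ih _ hlen' i h]
      by_cases hpi : p = (i : Int)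
      · have hget : PySem.List.pyGetD sequence p 0 = sequence[i] := by
          subst hpi
          rw [PySem.List.pyGetD_natCast]
          exact List.getD_eq_getElem sequence 0 h
        have hti : p.toNat = i := by omega
        by_cases hir : (i : Int) ∈ rest
        · simp [hir, List.mem_cons]
        · simp [hir, hpi, List.mem_cons, h]
      · have hti : p.toNat ≠ i := by omega
        have hmem : ((i : Int) ∈ p :: rest) ↔ ((i : Int) ∈ rest) := by
          simp [List.mem_cons]; intro he; exact absurd he.symm hpi
        by_cases hir : (i : Int) ∈ rest
        · simp [hir, hmem]
        · simp [hir, hmem, hti]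
    · have hstep : pvScat sequence acc (p :: rest) = pvScat sequence acc rest := by
        simp [pvScat, List.foldl_cons, hg]
      rw [List.getElem_of_eq hstep, ih acc hlen i h]
      have hpi : p ≠ (i : Int) := by omega
      have hmem : ((i : Int) ∈ p :: rest) ↔ ((i : Int) ∈ rest) := by
        simp [List.mem_cons]; intro he; exact absurd he.symm hpi
      simp [hmem]

lemma pv_gather (sequence hp : List Int) :
    (PySem.List.enumerate sequence).foldl
      (fun acc iv =>
        if iv.1 ∈ hp then acc ++ ["\x1b[42m" ++ PySem.Int.toStr iv.2 ++ "\x1b[0m"]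
        else acc ++ [PySem.Int.toStr iv.2]) []
    = (PySem.List.enumerate sequence).map
        (fun iv => if iv.1 ∈ hp then pvHi iv.2 else PySem.Int.toStr iv.2) := by
  have h2 : (PySem.List.enumerate sequence).foldl
      (fun acc iv =>
        if iv.1 ∈ hp then acc ++ ["\x1b[42m" ++ PySem.Int.toStr iv.2 ++ "\x1b[0m"]
        else acc ++ [PySem.Int.toStr iv.2]) []
    = (PySem.List.enumerate sequence).foldl
      (fun acc iv => acc ++ [if iv.1 ∈ hp then pvHi iv.2 else PySem.Int.toStr iv.2]) [] := by
    apply PySem.List.foldl_congr_mem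
    intro acc iv _
    by_cases hm : iv.1 ∈ hp <;> simp [hm, pvHi]
  rw [h2, PySem.List.foldl_append_singleton_eq_map]
  simp

lemma pv_lists_eq (sequence hp : List Int) :
    (PySem.List.enumerate sequence).foldl
      (fun acc iv =>
        if iv.1 ∈ hp then acc ++ ["\x1b[42m" ++ PySem.Int.toStr iv.2 ++ "\x1b[0m"]
        else acc ++ [PySem.Int.toStr iv.2]) []
    = hp.foldl (fun acc pos =>
        if 0 ≤ pos ∧ pos < (sequence.length : Int) then
          PySem.List.pySetD acc pos
            ("\x1b[42m" ++ PySem.Int.toStr (PySem.List.pyGetD sequence pos 0) ++ "\x1b[0m")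
        else acc) (sequence.map (fun v => PySem.Int.toStr v)) := by
  rw [pv_gather]
  have hbase : (sequence.map (fun v => PySem.Int.toStr v)).length = sequence.length := by simp
  have hscatter_eq : (hp.foldl (fun acc pos =>
        if 0 ≤ pos ∧ pos < (sequence.length : Int) then
          PySem.List.pySetD acc pos
            ("\x1b[42m" ++ PySem.Int.toStr (PySem.List.pyGetD sequence pos 0) ++ "\x1b[0m")
        else acc) (sequence.map (fun v => PySem.Int.toStr v)))
      = pvScat sequence (sequence.map (fun v => PySem.Int.toStr v)) hp := rfl
  rw [hscatter_eq]
  apply List.ext_getElem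
  · simp [pv_scatter_len, PySem.List.length_enumerate]
  · intro i h1 h2
    have hi : i < sequence.length := by simpa [PySem.List.length_enumerate] using h1
    rw [pv_scatter_get sequence hp _ hbase i hi]
    rw [List.getElem_map]
    rw [pv_enum_getElem sequence 0 i hi]
    simp [pvHi]

-- ===== VERDICT (by name: the statement is the Claim_ definition above) =====
theorem format_highlighted_sequence_spec : Claim_equal_format_highlighted_sequence := by
  intro sequence hp _
  unfold Spec_format_highlighted_sequence format_highlighted_sequence format_highlighted_sequence_alt
  simp only []
  rw [pv_lists_eq]
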